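-- pv_equiv track=rewrite | github.com/thilinicooray/DSA-Practice | graph/AM13_task_scheduling_2.py | get_dependents
-- ===== SOURCE A (Python) =====
-- def get_dependents(tasks, reqs):
--     dep = {}
--     dep_counts = {}
--
--     for req in reqs:
--         for i in range(len(req)):
--
--             if req[i] not in dep:
--                 dep[req[i]] = set()
--
--             if req[i] not in dep_counts:
--                 dep_counts[req[i]] = 0
--
--             if i > 0:
--                 cur = req[i]
--                 prev = req[i-1]
--
--                 if cur not in dep[prev]:
--                     dep[prev].add(cur)
--                     dep_counts[cur] +=1
--
--     for task in tasks:
--         if task not in dep: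
--             dep[task] = set()
--
--         if task not in dep_counts:
--             dep_counts[task] = 0
--
--     return dep, dep_counts
-- ===== SOURCE B (Python) =====
-- def get_dependents(tasks, reqs):
--     # Phase 1: build the successor-set graph only (sets deduplicate edges by themselves).
--     dep = {}
--     for req in reqs:
--         for node in req:
--             dep.setdefault(node, set())
--     for task in tasks:
--         dep.setdefault(task, set())
--     for req in reqs:
--         for prev, cur in zip(req, req[1:]):
--             dep[prev].add(cur)
--     # Phase 2: derive the in-degree table from the finished graph.
--     dep_counts = {node: 0 for node in dep}
--     for succs in dep.values():
--         for cur in succs: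
--             dep_counts[cur] += 1
--     return dep, dep_counts
-- ===== Notes on version B (the rewrite author's own statement) =====
-- stated objective: alternative
-- what changed: B first builds only the successor-set graph (sets deduplicate edges on their own, no counter bookkeeping in the edge loop) and then derives the whole in-degree table in a separate counting phase over the finished adjacency sets, instead of A's single interleaved index loop that maintains dep and dep_counts simultaneously.
import Mathlib
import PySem

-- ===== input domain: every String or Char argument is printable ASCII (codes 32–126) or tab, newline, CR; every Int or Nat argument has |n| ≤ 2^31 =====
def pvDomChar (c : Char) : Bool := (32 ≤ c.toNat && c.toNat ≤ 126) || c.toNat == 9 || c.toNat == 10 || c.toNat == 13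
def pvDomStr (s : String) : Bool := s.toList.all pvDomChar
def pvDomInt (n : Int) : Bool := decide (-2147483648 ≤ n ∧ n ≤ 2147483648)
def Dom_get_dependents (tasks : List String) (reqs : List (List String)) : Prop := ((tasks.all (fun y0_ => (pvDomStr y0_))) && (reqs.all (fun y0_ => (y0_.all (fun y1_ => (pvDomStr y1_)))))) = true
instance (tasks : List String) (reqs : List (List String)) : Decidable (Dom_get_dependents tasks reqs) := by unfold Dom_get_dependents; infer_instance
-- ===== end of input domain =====

-- B builds only the successor-set graph first (sets deduplicate edges themselves) and then
-- derives the whole in-degree table in a separate counting phase over the finished adjacency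
-- sets, instead of A's single interleaved loop maintaining both dicts; same cost, same value.

-- ===== PORT A =====
-- the body of A's inner 'for i in range(len(req))' loop, as a named helper (literal transliteration)
def pvABody (req : List String) (s : PySem.Dict String (PySem.Set String) × PySem.Dict String Int) (i : Int) :
    PySem.Dict String (PySem.Set String) × PySem.Dict String Int :=
  let x := PySem.List.pyGetD req i ""                    -- req[i]; i ∈ range(len(req)) so always in range
  let dep := if s.1.contains x then s.1 else s.1.insert x PySem.Set.empty
  let dc  := if s.2.contains x then s.2 else s.2.insert x 0
  if i > 0 then
    let cur := x
    let prev := PySem.List.pyGetD req (i - 1) ""         -- req[i-1]; in range since 0 < i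
    if (dep.getD prev PySem.Set.empty).contains cur then (dep, dc)
    else (dep.modify prev PySem.Set.empty (fun t => PySem.Set.add t cur),   -- dep[prev].add(cur); prev is a key
          dc.modify cur 0 (fun n => n + 1))                                 -- dep_counts[cur] += 1; cur is a key
  else (dep, dc)
def get_dependents (tasks : List String) (reqs : List (List String)) : (List (String × List String)) × (List (String × Int)) :=
  let s : PySem.Dict String (PySem.Set String) × PySem.Dict String Int :=
    reqs.foldl (fun s req =>
      (PySem.List.pyRange 0 (req.length : Int) 1).foldl (pvABody req) s)
      (PySem.Dict.empty, PySem.Dict.empty)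
  let s := tasks.foldl (fun s task =>
      ((if s.1.contains task then s.1 else s.1.insert task PySem.Set.empty),
       (if s.2.contains task then s.2 else s.2.insert task 0))) s
  (s.1.items, s.2.items)

-- ===== PORT B =====
def get_dependents_alt (tasks : List String) (reqs : List (List String)) : (List (String × List String)) × (List (String × Int)) :=
  -- phase 1: the graph alone
  let dep : PySem.Dict String (PySem.Set String) :=
    reqs.foldl (fun d req => req.foldl (fun d node => d.setdefault node PySem.Set.empty) d) PySem.Dict.empty
  let dep := tasks.foldl (fun d task => d.setdefault task PySem.Set.empty) dep
  let dep := reqs.foldl (fun d req =>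
      (req.zip (PySem.List.slice req (some 1) none)).foldl            -- zip(req, req[1:])
        (fun d pc => d.modify pc.1 PySem.Set.empty (fun t => PySem.Set.add t pc.2)) d) dep
  -- phase 2: in-degrees derived from the finished graph
  let dc : PySem.Dict String Int :=
    dep.keys.foldl (fun c node => c.insert node 0) PySem.Dict.empty   -- {node: 0 for node in dep}
  let dc := dep.values.foldl (fun c succs =>
      succs.foldl (fun c cur => c.modify cur 0 (fun n => n + 1)) c) dc
  (dep.items, dc.items)

-- ===== PRECONDITION & SPEC =====
def Spec_get_dependents (tasks : List String) (reqs : List (List String)) (out : (List (String × List String)) × (List (String × Int))) : Prop := out = get_dependents_alt tasks reqs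
instance (tasks : List String) (reqs : List (List String)) (out : (List (String × List String)) × (List (String × Int))) : Decidable (Spec_get_dependents tasks reqs out) := by unfold Spec_get_dependents; infer_instance

-- ===== CLAIM (what is proved, stated in full; the proofs are below) =====
def Claim_equal_get_dependents : Prop := ∀ (tasks : List String) (reqs : List (List String)), Dom_get_dependents tasks reqs → Spec_get_dependents tasks reqs (get_dependents tasks reqs)

-- ===== LEMMAS AND PROOFS =====

-- the A-side state and the primitive steps A is built from
abbrev pvSt : Type := PySem.Dict String (PySem.Set String) × PySem.Dict String Int

def pvInit (s : pvSt) (x : String) : pvSt :=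
  ((if s.1.contains x then s.1 else s.1.insert x PySem.Set.empty),
   (if s.2.contains x then s.2 else s.2.insert x 0))

def pvEdge (s : pvSt) (e : String × String) : pvSt :=
  if (s.1.getD e.1 PySem.Set.empty).contains e.2 then s
  else (s.1.modify e.1 PySem.Set.empty (fun t => PySem.Set.add t e.2),
        s.2.modify e.2 0 (fun n => n + 1))

def pvStepA (s : pvSt) (e : String × String) : pvSt := pvEdge (pvInit s e.2) e

-- canonical values determined by the processed node list N and edge list E
def pvVal (E : List (String × String)) (k : String) : PySem.Set String :=
  PySem.Set.ofList ((E.filter (fun e => e.1 == k)).map (fun e => e.2))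

def pvCnt (E : List (String × String)) (k : String) : Int :=
  (((PySem.Set.ofList E).filter (fun e => e.2 == k)).length : Int)

def pvInv (N : List String) (E : List (String × String)) (s : pvSt) : Prop :=
  s.1.keys = PySem.Set.ofList N ∧ s.2.keys = PySem.Set.ofList N ∧
  (∀ k, s.1.getD k PySem.Set.empty = pvVal E k) ∧ (∀ k, s.2.getD k 0 = pvCnt E k)

-- the B-side graph-only invariant
def pvInvD (N : List String) (E : List (String × String)) (d : PySem.Dict String (PySem.Set String)) : Prop :=
  d.keys = PySem.Set.ofList N ∧ (∀ k, d.getD k PySem.Set.empty = pvVal E k)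

theorem pvSet_ofList_snoc {α : Type} [BEq α] (xs : List α) (x : α) :
    PySem.Set.ofList (xs ++ [x]) = PySem.Set.add (PySem.Set.ofList xs) x := by
  simp [PySem.Set.ofList_eq_foldl, List.foldl_append]

theorem pvVal_contains (E : List (String × String)) (p c : String) :
    (pvVal E p).contains c = true ↔ (p, c) ∈ E := by
  unfold pvVal
  rw [PySem.Set.contains_iff, PySem.Set.mem_ofList, List.mem_map]
  constructor
  · rintro ⟨⟨a, b⟩, he, rfl⟩
    rw [List.mem_filter] at he
    have ha : a = p := by simpa using he.2
    subst ha
    exact he.1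
  · intro h
    exact ⟨(p, c), List.mem_filter.2 ⟨h, by simp⟩, rfl⟩

theorem pvVal_snoc (E : List (String × String)) (e : String × String) (k : String) :
    pvVal (E ++ [e]) k = if k = e.1 then PySem.Set.add (pvVal E k) e.2 else pvVal E k := by
  rcases eq_or_ne k e.1 with h | h
  · subst h
    simp [pvVal, List.filter_append, pvSet_ofList_snoc]
  · simp [pvVal, List.filter_append, h, Ne.symm h]

theorem pvCnt_snoc_mem (E : List (String × String)) (e : String × String) (he : e ∈ E) (k : String) :
    pvCnt (E ++ [e]) k = pvCnt E k := by
  have hc : (PySem.Set.ofList E).contains e = true :=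
    (PySem.Set.contains_iff _ _).2 ((PySem.Set.mem_ofList E e).2 he)
  unfold pvCnt
  rw [pvSet_ofList_snoc]
  simp [PySem.Set.add, he]

theorem pvCnt_snoc_not_mem (E : List (String × String)) (e : String × String) (he : e ∉ E) (k : String) :
    pvCnt (E ++ [e]) k = if k = e.2 then pvCnt E k + 1 else pvCnt E k := by
  have hc : (PySem.Set.ofList E).contains e = false := by
    rw [Bool.eq_false_iff]
    intro h
    exact he ((PySem.Set.mem_ofList E e).1 ((PySem.Set.contains_iff _ _).1 h))
  unfold pvCnt
  rw [pvSet_ofList_snoc]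
  rcases eq_or_ne k e.2 with h | h
  · subst h
    simp [PySem.Set.add, he, List.filter_append]
  · simp [PySem.Set.add, he, List.filter_append, h, Ne.symm h]

-- step lemma: initializing one node (A's pair form)
theorem pvInv_init {N : List String} {E : List (String × String)} {s : pvSt}
    (h : pvInv N E s) (x : String) : pvInv (N ++ [x]) E (pvInit s x) := by
  obtain ⟨hk1, hk2, hv, hc⟩ := h
  have hsnoc : PySem.Set.ofList (N ++ [x]) = PySem.Set.add (PySem.Set.ofList N) x :=
    pvSet_ofList_snoc N x
  by_cases hx : x ∈ N
  · have hx' : x ∈ PySem.Set.ofList N := (PySem.Set.mem_ofList N x).2 hx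
    have c1 : s.1.contains x = true := by
      rw [PySem.Dict.contains_eq_decide_mem_keys, hk1]; exact decide_eq_true hx'
    have c2 : s.2.contains x = true := by
      rw [PySem.Dict.contains_eq_decide_mem_keys, hk2]; exact decide_eq_true hx'
    have hsame : PySem.Set.add (PySem.Set.ofList N) x = PySem.Set.ofList N := by
      simp [PySem.Set.add, hx]
    unfold pvInit pvInv
    rw [if_pos c1, if_pos c2, hsnoc, hsame]
    exact ⟨hk1, hk2, hv, hc⟩
  · have hx' : x ∉ PySem.Set.ofList N := fun h => hx ((PySem.Set.mem_ofList N x).1 h)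
    have c1 : s.1.contains x = false := by
      rw [PySem.Dict.contains_eq_decide_mem_keys, hk1]; exact decide_eq_false hx'
    have c2 : s.2.contains x = false := by
      rw [PySem.Dict.contains_eq_decide_mem_keys, hk2]; exact decide_eq_false hx'
    have hgrow : PySem.Set.add (PySem.Set.ofList N) x = PySem.Set.ofList N ++ [x] := by
      simp [PySem.Set.add, hx]
    unfold pvInit pvInv
    rw [if_neg (by rw [c1]; exact Bool.false_ne_true),
        if_neg (by rw [c2]; exact Bool.false_ne_true), hsnoc, hgrow]
    refine ⟨?_, ?_, ?_, ?_⟩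
    · rw [PySem.Dict.keys_insert_of_not_contains _ _ c1, hk1]
    · rw [PySem.Dict.keys_insert_of_not_contains _ _ c2, hk2]
    · intro k
      rw [PySem.Dict.getD_insert]
      rcases eq_or_ne k x with rfl | hne
      · rw [if_pos rfl, ← hv k, PySem.Dict.getD_of_not_contains _ _ c1]
      · rw [if_neg hne]; exact hv k
    · intro k
      rw [PySem.Dict.getD_insert]
      rcases eq_or_ne k x with rfl | hne
      · rw [if_pos rfl, ← hc k, PySem.Dict.getD_of_not_contains _ _ c2]
      · rw [if_neg hne]; exact hc k

-- step lemma: one (guarded) A-edge whose endpoints are already keys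
theorem pvInv_edge {N : List String} {E : List (String × String)} {s : pvSt}
    (h : pvInv N E s) (e : String × String)
    (h1 : e.1 ∈ N) (h2 : e.2 ∈ N) : pvInv N (E ++ [e]) (pvEdge s e) := by
  obtain ⟨p, c⟩ := e
  obtain ⟨hk1, hk2, hv, hc⟩ := h
  unfold pvEdge
  simp only
  rw [hv p]
  by_cases hmem : (p, c) ∈ E
  · rw [if_pos ((pvVal_contains E p c).2 hmem)]
    refine ⟨hk1, hk2, ?_, ?_⟩
    · intro k
      rw [hv k, pvVal_snoc]
      rcases eq_or_ne k p with rfl | hne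
      · rw [if_pos rfl]
        have hcon : c ∈ pvVal E k :=
          (PySem.Set.contains_iff _ _).1 ((pvVal_contains E k c).2 hmem)
        simp [PySem.Set.add, hcon]
      · rw [if_neg hne]
    · intro k
      rw [hc k, pvCnt_snoc_mem E (p, c) hmem k]
  · have hg : (pvVal E p).contains c = false := by
      rw [Bool.eq_false_iff]
      intro hcon
      exact hmem ((pvVal_contains E p c).1 hcon)
    rw [if_neg (by rw [hg]; exact Bool.false_ne_true)]
    have hkc1 : s.1.contains p = true := by
      rw [PySem.Dict.contains_eq_decide_mem_keys, hk1]
      exact decide_eq_true ((PySem.Set.mem_ofList N p).2 h1)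
    have hkc2 : s.2.contains c = true := by
      rw [PySem.Dict.contains_eq_decide_mem_keys, hk2]
      exact decide_eq_true ((PySem.Set.mem_ofList N c).2 h2)
    refine ⟨?_, ?_, ?_, ?_⟩
    · rw [PySem.Dict.keys_modify, PySem.Dict.keys_insert_of_contains _ _ hkc1, hk1]
    · rw [PySem.Dict.keys_modify, PySem.Dict.keys_insert_of_contains _ _ hkc2, hk2]
    · intro k
      rw [PySem.Dict.getD_modify, pvVal_snoc]
      rcases eq_or_ne k p with rfl | hne
      · rw [if_pos rfl, if_pos rfl, hv k]
      · rw [if_neg hne, if_neg hne]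
        exact hv k
    · intro k
      rw [PySem.Dict.getD_modify, pvCnt_snoc_not_mem E (p, c) hmem k]
      rcases eq_or_ne k c with rfl | hne
      · rw [if_pos rfl, if_pos rfl, hc k]
      · rw [if_neg hne, if_neg hne]
        exact hc k

-- A's inner index loop, rewritten structurally: fold over zip (h :: t) t
theorem pvA_rangefold (t : List String) : ∀ (h : String) (s : pvSt),
    (List.range t.length).foldl
      (fun s i => pvStepA s ((h :: t).getD i "", t.getD i "")) s
    = ((h :: t).zip t).foldl pvStepA s := by
  induction t with
  | nil => intro h s; simp
  | cons y t' ih =>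
    intro h s
    rw [show (y :: t').length = t'.length + 1 from rfl, List.range_succ_eq_map]
    simp only [List.foldl_cons, List.foldl_map, Nat.succ_eq_add_one, List.getD_cons_succ,
      List.getD_cons_zero]
    rw [show ((h :: y :: t').zip (y :: t')) = (h, y) :: ((y :: t').zip t') from rfl,
      List.foldl_cons]
    exact ih y (pvStepA s (h, y))

-- A's per-req loop in terms of pvInit / pvStepA
theorem pvA_req_nil (s : pvSt) :
    (PySem.List.pyRange 0 ((([] : List String)).length : Int) 1).foldl (pvABody []) s = s := by
  rw [show ((([] : List String)).length : Int) = ((0 : Nat) : Int) from rfl,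
      PySem.List.pyRange_zero_natCast]
  simp

theorem pvA_req_cons (hd : String) (tl : List String) (s : pvSt) :
    (PySem.List.pyRange 0 (((hd :: tl)).length : Int) 1).foldl (pvABody (hd :: tl)) s
    = ((hd :: tl).zip tl).foldl pvStepA (pvInit s hd) := by
  rw [PySem.List.pyRange_zero_natCast, List.foldl_map,
      show (hd :: tl).length = tl.length + 1 from rfl, List.range_succ_eq_map]
  simp only [List.foldl_cons, List.foldl_map]
  have hzero : pvABody (hd :: tl) s (((0 : Nat) : Int)) = pvInit s hd := by
    simp [pvABody, pvInit]
  rw [hzero, ← pvA_rangefold tl hd (pvInit s hd)]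
  apply PySem.List.foldl_congr_mem
  intro acc i _
  have hpos : (0 : Int) < ((i + 1 : Nat) : Int) := by exact_mod_cast Nat.succ_pos i
  have hgetx : PySem.List.pyGetD (hd :: tl) ((i + 1 : Nat) : Int) "" = tl.getD i "" := by
    rw [PySem.List.pyGetD_natCast, List.getD_cons_succ]
  have hgetp : PySem.List.pyGetD (hd :: tl) (((i + 1 : Nat) : Int) - 1) "" = (hd :: tl).getD i "" := by
    rw [show ((i + 1 : Nat) : Int) - 1 = ((i : Nat) : Int) by push_cast; ring,
      PySem.List.pyGetD_natCast]
  have hstep : pvABody (hd :: tl) acc ((i + 1 : Nat) : Int)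
      = pvStepA acc ((hd :: tl).getD i "", tl.getD i "") := by
    simp only [pvABody, pvStepA, pvInit, pvEdge, hgetx, hgetp]
    simp only [if_pos hpos]
  simp only [Nat.succ_eq_add_one]
  exact hstep

def pvPairs (r : List String) : List (String × String) := r.zip r.tail

-- A's whole reqs loop preserves the invariant
theorem pvA_reqs (reqs : List (List String)) :
    ∀ {N : List String} {E : List (String × String)} {s : pvSt}, pvInv N E s →
    pvInv (N ++ reqs.flatten) (E ++ reqs.flatMap pvPairs)
      (reqs.foldl (fun s req =>
        (PySem.List.pyRange 0 (req.length : Int) 1).foldl (pvABody req) s) s) := by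
  have inner : ∀ (t : List String) (x : String) {N : List String}
      {E : List (String × String)} (s : pvSt), pvInv N E s → x ∈ N →
      pvInv (N ++ t) (E ++ (x :: t).zip t) (((x :: t).zip t).foldl pvStepA s) := by
    intro t
    induction t with
    | nil => intro x N E s h _; simpa using h
    | cons y t' ih2 =>
      intro x N E s h hx
      rw [show ((x :: y :: t').zip (y :: t')) = (x, y) :: ((y :: t').zip t') from rfl,
          List.foldl_cons,
          show N ++ y :: t' = (N ++ [y]) ++ t' by simp,
          show E ++ (x, y) :: ((y :: t').zip t') = (E ++ [(x, y)]) ++ ((y :: t').zip t') by simp]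
      have h2 : pvInv (N ++ [y]) (E ++ [(x, y)]) (pvStepA s (x, y)) :=
        pvInv_edge (pvInv_init h y) (x, y) (by simp [hx]) (by simp)
      exact ih2 y (pvStepA s (x, y)) h2 (by simp)
  induction reqs with
  | nil => intro N E s h; simpa using h
  | cons r rs ih =>
    intro N E s h
    rw [List.foldl_cons,
        show (r :: rs).flatten = r ++ rs.flatten from rfl,
        show (r :: rs).flatMap pvPairs = pvPairs r ++ rs.flatMap pvPairs from rfl,
        show N ++ (r ++ rs.flatten) = (N ++ r) ++ rs.flatten by simp,
        show E ++ (pvPairs r ++ rs.flatMap pvPairs) = (E ++ pvPairs r) ++ rs.flatMap pvPairs by simp]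
    cases r with
    | nil =>
      rw [pvA_req_nil]
      exact ih (by simpa [pvPairs] using h)
    | cons x t =>
      rw [pvA_req_cons]
      refine ih ?_
      have h0 : pvInv (N ++ [x]) E (pvInit s x) := pvInv_init h x
      have := inner t x (pvInit s x) h0 (by simp)
      rw [show (N ++ [x]) ++ t = N ++ x :: t by simp] at this
      simpa [pvPairs] using this

theorem pvInv_init_fold {E : List (String × String)} (xs : List String) :
    ∀ {N : List String} {s : pvSt}, pvInv N E s → pvInv (N ++ xs) E (xs.foldl pvInit s) := by
  induction xs with
  | nil => intro N s h; simpa using h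
  | cons x t ih =>
    intro N s h
    rw [List.foldl_cons, show N ++ x :: t = (N ++ [x]) ++ t by simp]
    exact ih (pvInv_init h x)

theorem pvInv_empty : pvInv [] [] ((PySem.Dict.empty, PySem.Dict.empty) : pvSt) := by
  refine ⟨rfl, rfl, fun k => ?_, fun k => ?_⟩ <;>
    simp [pvVal, pvCnt, PySem.Dict.getD_empty, PySem.Set.ofList, PySem.Set.empty]

-- ===== B-side lemmas: graph phase =====

-- B's setdefault init step preserves the graph-only invariant
theorem pvInvD_init {N : List String} {E : List (String × String)}
    {d : PySem.Dict String (PySem.Set String)} (h : pvInvD N E d) (x : String) :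
    pvInvD (N ++ [x]) E (d.setdefault x PySem.Set.empty) := by
  obtain ⟨hk, hv⟩ := h
  have hsnoc := pvSet_ofList_snoc N x
  by_cases hx : x ∈ N
  · have hx' : x ∈ PySem.Set.ofList N := (PySem.Set.mem_ofList N x).2 hx
    have c1 : d.contains x = true := by
      rw [PySem.Dict.contains_eq_decide_mem_keys, hk]; exact decide_eq_true hx'
    rw [PySem.Dict.setdefault_of_contains _ _ c1]
    refine ⟨?_, hv⟩
    rw [hk, hsnoc]
    simp [PySem.Set.add, hx]
  · have hx' : x ∉ PySem.Set.ofList N := fun h => hx ((PySem.Set.mem_ofList N x).1 h)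
    have c1 : d.contains x = false := by
      rw [PySem.Dict.contains_eq_decide_mem_keys, hk]; exact decide_eq_false hx'
    rw [PySem.Dict.setdefault_of_not_contains _ _ c1]
    refine ⟨?_, ?_⟩
    · rw [PySem.Dict.keys_insert_of_not_contains _ _ c1, hk, hsnoc]
      simp [PySem.Set.add, hx]
    · intro k
      rw [PySem.Dict.getD_insert]
      rcases eq_or_ne k x with rfl | hne
      · rw [if_pos rfl, ← hv k, PySem.Dict.getD_of_not_contains _ _ c1]
      · rw [if_neg hne]; exact hv k

theorem pvInvD_init_fold {E : List (String × String)} (xs : List String) :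
    ∀ {N : List String} {d : PySem.Dict String (PySem.Set String)}, pvInvD N E d →
    pvInvD (N ++ xs) E (xs.foldl (fun d node => d.setdefault node PySem.Set.empty) d) := by
  induction xs with
  | nil => intro N d h; simpa using h
  | cons x t ih =>
    intro N d h
    rw [List.foldl_cons, show N ++ x :: t = (N ++ [x]) ++ t by simp]
    exact ih (pvInvD_init h x)

-- B's nested initialization pass over reqs
theorem pvInvD_init_nested (rs : List (List String)) :
    ∀ {N : List String} {E : List (String × String)} {d : PySem.Dict String (PySem.Set String)},
    pvInvD N E d →
    pvInvD (N ++ rs.flatten) E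
      (rs.foldl (fun d req => req.foldl (fun d node => d.setdefault node PySem.Set.empty) d) d) := by
  induction rs with
  | nil => intro N E d h; simpa using h
  | cons r rs' ih =>
    intro N E d h
    rw [List.foldl_cons,
        show (r :: rs').flatten = r ++ rs'.flatten from rfl,
        show N ++ (r ++ rs'.flatten) = (N ++ r) ++ rs'.flatten by simp]
    exact ih (pvInvD_init_fold r h)

-- B's unguarded edge step: the set's own dedup keeps the invariant
theorem pvInvD_edge {N : List String} {E : List (String × String)}
    {d : PySem.Dict String (PySem.Set String)} (h : pvInvD N E d) (e : String × String)
    (h1 : e.1 ∈ N) : pvInvD N (E ++ [e]) (d.modify e.1 PySem.Set.empty (fun t => PySem.Set.add t e.2)) := by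
  obtain ⟨hk, hv⟩ := h
  have hkc : d.contains e.1 = true := by
    rw [PySem.Dict.contains_eq_decide_mem_keys, hk]
    exact decide_eq_true ((PySem.Set.mem_ofList N e.1).2 h1)
  refine ⟨?_, ?_⟩
  · rw [PySem.Dict.keys_modify, PySem.Dict.keys_insert_of_contains _ _ hkc, hk]
  · intro k
    rw [PySem.Dict.getD_modify, pvVal_snoc]
    rcases eq_or_ne k e.1 with rfl | hne
    · rw [if_pos rfl, if_pos rfl, hv e.1]
    · rw [if_neg hne, if_neg hne]
      exact hv k

-- endpoints of a zip pair lie in the list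
theorem pvPairs_mem {r : List String} {e : String × String} (h : e ∈ pvPairs r) :
    e.1 ∈ r ∧ e.2 ∈ r := by
  obtain ⟨a, b⟩ := e
  unfold pvPairs at h
  have h1 := List.of_mem_zip h
  exact ⟨h1.1, List.mem_of_mem_tail h1.2⟩

theorem pvInvD_edge_fold {N : List String} (l : List (String × String)) :
    ∀ {E : List (String × String)} {d : PySem.Dict String (PySem.Set String)}, pvInvD N E d →
    (∀ e ∈ l, e.1 ∈ N) →
    pvInvD N (E ++ l)
      (l.foldl (fun d pc => d.modify pc.1 PySem.Set.empty (fun t => PySem.Set.add t pc.2)) d) := by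
  induction l with
  | nil => intro E d h _; simpa using h
  | cons e t ih =>
    intro E d h hl
    rw [List.foldl_cons, show E ++ e :: t = (E ++ [e]) ++ t by simp]
    exact ih (pvInvD_edge h e (hl e (by simp))) (fun e' he' => hl e' (by simp [he']))

-- B's whole edge pass over reqs
theorem pvInvD_edges (rs : List (List String)) :
    ∀ {N : List String} {E : List (String × String)} {d : PySem.Dict String (PySem.Set String)},
    pvInvD N E d → (∀ r ∈ rs, ∀ x ∈ r, x ∈ N) →
    pvInvD N (E ++ rs.flatMap pvPairs)
      (rs.foldl (fun d req =>
        (req.zip (PySem.List.slice req (some 1) none)).foldl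
          (fun d pc => d.modify pc.1 PySem.Set.empty (fun t => PySem.Set.add t pc.2)) d) d) := by
  induction rs with
  | nil => intro N E d h _; simpa using h
  | cons r rs' ih =>
    intro N E d h hsub
    rw [List.foldl_cons, PySem.List.slice_from_one,
        show (r :: rs').flatMap pvPairs = pvPairs r ++ rs'.flatMap pvPairs from rfl,
        show E ++ (pvPairs r ++ rs'.flatMap pvPairs) = (E ++ pvPairs r) ++ rs'.flatMap pvPairs by simp,
        show r.zip r.tail = pvPairs r from rfl]
    exact ih (pvInvD_edge_fold (pvPairs r) h
        (fun e he => hsub r (by simp) e.1 (pvPairs_mem he).1))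
      (fun r' hr' => hsub r' (by simp [hr']))

theorem pvInvD_empty : pvInvD [] [] (PySem.Dict.empty : PySem.Dict String (PySem.Set String)) := by
  refine ⟨rfl, fun k => ?_⟩
  simp [pvVal, PySem.Dict.getD_empty, PySem.Set.ofList, PySem.Set.empty]

-- ===== B-side lemmas: counting phase =====

-- zero-initialization: {node: 0 for node in dep}
theorem pvZero_getD (ks : List String) :
    ∀ (c : PySem.Dict String Int), (∀ k, c.getD k 0 = 0) →
    ∀ k, (ks.foldl (fun c node => c.insert node 0) c).getD k 0 = 0 := by
  induction ks with
  | nil => intro c h k; simpa using h k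
  | cons x t ih =>
    intro c h k
    rw [List.foldl_cons]
    refine ih _ (fun k' => ?_) k
    rw [PySem.Dict.getD_insert]
    split_ifs with hx
    · rfl
    · exact h k'

-- the incrementing pass: each inner fold adds the list's multiplicity of k
theorem pvIncr_getD (L : List (List String)) :
    ∀ (c : PySem.Dict String Int) (k : String),
    ((L.foldl (fun c succs => succs.foldl (fun c cur => c.modify cur 0 (fun n => n + 1)) c) c).getD k 0)
      = c.getD k 0 + ((L.map (fun l => (l.count k : Int))).sum) := by
  induction L with
  | nil => intro c k; simp
  | cons l L' ih =>
    intro c k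
    rw [List.foldl_cons, ih, PySem.Dict.getD_foldl_modify_add_one]
    simp [add_assoc]

-- the incrementing pass never creates a key when every element is already one
theorem pvIncr_keys (L : List (List String)) :
    ∀ (c : PySem.Dict String Int), (∀ l ∈ L, ∀ x ∈ l, x ∈ c.keys) →
    (L.foldl (fun c succs => succs.foldl (fun c cur => c.modify cur 0 (fun n => n + 1)) c) c).keys = c.keys := by
  induction L with
  | nil => intro c _; rfl
  | cons l L' ih =>
    intro c h
    rw [List.foldl_cons]
    have hinner : (l.foldl (fun c cur => c.modify cur 0 (fun n => n + 1)) c).keys = c.keys := by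
      rw [PySem.Dict.keys_foldl_modify, PySem.Set.update_eq_append_filter]
      have : (PySem.Set.ofList l).filter (fun y => !(PySem.Set.contains c.keys y)) = [] := by
        rw [List.filter_eq_nil_iff]
        intro y hy
        have hyc : y ∈ c.keys := h l (by simp) y ((PySem.Set.mem_ofList l y).1 hy)
        simpa using hyc
      rw [this, List.append_nil]
    rw [ih _ (by intro l' hl' x hx; rw [hinner]; exact h l' (by simp [hl']) x hx), hinner]

-- the derived count: summing set multiplicities over the keys recovers pvCnt
theorem pvCount_from_graph (ks : List String) (E : List (String × String)) (k : String)
    (hnd : ks.Nodup) (hE : ∀ e ∈ E, e.1 ∈ ks) :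
    ((ks.map (fun p => ((pvVal E p).count k : Int))).sum) = pvCnt E k := by
  have hval : ∀ p, ((pvVal E p).count k : Int) = if (pvVal E p).contains k then 1 else 0 := by
    intro p
    have hndp : (pvVal E p).Nodup := by unfold pvVal; exact PySem.Set.nodup_ofList _
    by_cases hmem : k ∈ pvVal E p
    · rw [List.count_eq_one_of_mem hndp hmem,
          if_pos ((PySem.Set.contains_iff _ _).2 hmem)]
      rfl
    · rw [List.count_eq_zero_of_not_mem hmem,
          if_neg (fun h => hmem ((PySem.Set.contains_iff _ _).1 h))]
      rfl
  calc ((ks.map (fun p => ((pvVal E p).count k : Int))).sum)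
      = ((ks.map (fun p => if (pvVal E p).contains k then (1 : Int) else 0)).sum) := by
        exact congrArg List.sum (List.map_congr_left (fun p _ => hval p))
    _ = ((ks.countP (fun p => (pvVal E p).contains k) : Int)) :=
        PySem.List.sum_map_ite_one_zero _ ks
    _ = pvCnt E k := by
        -- bijection between predecessors counted in ks and distinct edges into k
        rw [List.countP_eq_length_filter]
        unfold pvCnt
        congr 1
        have hFnd : ((PySem.Set.ofList E).filter (fun e => e.2 == k)).Nodup :=
          (PySem.Set.nodup_ofList E).filter _
        have hmapnd : (((PySem.Set.ofList E).filter (fun e => e.2 == k)).map Prod.fst).Nodup := by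
          refine List.Nodup.map_on ?_ hFnd
          intro a ha b hb hab
          have ha2 : a.2 = k := by simpa using (List.mem_filter.1 ha).2
          have hb2 : b.2 = k := by simpa using (List.mem_filter.1 hb).2
          exact Prod.ext hab (ha2.trans hb2.symm)
        have hperm : (ks.filter (fun p => (pvVal E p).contains k)).Perm
            (((PySem.Set.ofList E).filter (fun e => e.2 == k)).map Prod.fst) := by
          rw [List.perm_ext_iff_of_nodup (hnd.filter _) hmapnd]
          intro p
          rw [List.mem_filter, List.mem_map]
          constructor
          · rintro ⟨-, hc⟩
            have hpk : (p, k) ∈ E := (pvVal_contains E p k).1 hc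
            refine ⟨(p, k), List.mem_filter.2 ⟨(PySem.Set.mem_ofList E (p, k)).2 hpk, by simp⟩, rfl⟩
          · rintro ⟨⟨a, b⟩, he, rfl⟩
            have h1 := List.mem_filter.1 he
            have hb : b = k := by simpa using h1.2
            subst hb
            have hab : (a, b) ∈ E := (PySem.Set.mem_ofList E (a, b)).1 h1.1
            exact ⟨hE _ hab, (pvVal_contains E a b).2 hab⟩
        rw [hperm.length_eq, List.length_map]

-- items of a state satisfying the A-invariant
theorem pvItems_of_inv {N : List String} {E : List (String × String)} {s : pvSt}
    (h : pvInv N E s) :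
    s.1.items = (PySem.Set.ofList N).map (fun k => (k, (pvVal E k : List String))) ∧
    s.2.items = (PySem.Set.ofList N).map (fun k => (k, pvCnt E k)) := by
  obtain ⟨hk1, hk2, hv, hc⟩ := h
  have nd1 : s.1.keys.Nodup := by rw [hk1]; exact PySem.Set.nodup_ofList N
  have nd2 : s.2.keys.Nodup := by rw [hk2]; exact PySem.Set.nodup_ofList N
  constructor
  · rw [PySem.Dict.items_eq_map_keys s.1 nd1 PySem.Set.empty, hk1]
    exact List.map_congr_left (fun k _ => by rw [hv k])
  · rw [PySem.Dict.items_eq_map_keys s.2 nd2 0, hk2]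
    exact List.map_congr_left (fun k _ => by rw [hc k])

-- named stage values of the two ports (proof-side names for the fold chains)
def pvAst (tasks : List String) (reqs : List (List String)) : pvSt :=
  tasks.foldl pvInit
    (reqs.foldl (fun s req =>
      (PySem.List.pyRange 0 (req.length : Int) 1).foldl (pvABody req) s)
      (PySem.Dict.empty, PySem.Dict.empty))

def pvBdep (tasks : List String) (reqs : List (List String)) : PySem.Dict String (PySem.Set String) :=
  reqs.foldl (fun d req =>
      (req.zip (PySem.List.slice req (some 1) none)).foldl
        (fun d pc => d.modify pc.1 PySem.Set.empty (fun t => PySem.Set.add t pc.2)) d)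
    (tasks.foldl (fun d task => d.setdefault task PySem.Set.empty)
      (reqs.foldl (fun d req => req.foldl (fun d node => d.setdefault node PySem.Set.empty) d)
        PySem.Dict.empty))

def pvBdc (tasks : List String) (reqs : List (List String)) : PySem.Dict String Int :=
  (pvBdep tasks reqs).values.foldl (fun c succs =>
      succs.foldl (fun c cur => c.modify cur 0 (fun n => n + 1)) c)
    ((pvBdep tasks reqs).keys.foldl (fun c node => c.insert node 0) PySem.Dict.empty)

theorem pvA_eval (tasks : List String) (reqs : List (List String)) :
    get_dependents tasks reqs = ((pvAst tasks reqs).1.items, (pvAst tasks reqs).2.items) := rfl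

theorem pvB_eval (tasks : List String) (reqs : List (List String)) :
    get_dependents_alt tasks reqs = ((pvBdep tasks reqs).items, (pvBdc tasks reqs).items) := rfl

theorem pvAst_inv (tasks : List String) (reqs : List (List String)) :
    pvInv (reqs.flatten ++ tasks) (reqs.flatMap pvPairs) (pvAst tasks reqs) := by
  unfold pvAst
  have h0 := pvA_reqs reqs pvInv_empty
  simp only [List.nil_append] at h0
  exact pvInv_init_fold tasks h0

theorem pvBdep_inv (tasks : List String) (reqs : List (List String)) :
    pvInvD (reqs.flatten ++ tasks) (reqs.flatMap pvPairs) (pvBdep tasks reqs) := by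
  unfold pvBdep
  have h0 := pvInvD_init_nested reqs (E := ([] : List (String × String))) pvInvD_empty
  simp only [List.nil_append] at h0
  have h1 := pvInvD_init_fold tasks h0
  have h2 := pvInvD_edges reqs h1
    (fun r hr x hx => List.mem_append_left _ (List.mem_flatten.2 ⟨r, hr, hx⟩))
  simpa using h2

-- ===== VERDICT (by name: the statement is the Claim_ definition above) =====
set_option maxHeartbeats 1000000 in
theorem get_dependents_spec : Claim_equal_get_dependents := by
  intro tasks reqs _
  unfold Spec_get_dependents
  rw [pvA_eval, pvB_eval]
  have hA := pvAst_inv tasks reqs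
  obtain ⟨hAitems1, hAitems2⟩ := pvItems_of_inv hA
  obtain ⟨hdk, hdv⟩ := pvBdep_inv tasks reqs
  have hndN : (PySem.Set.ofList (reqs.flatten ++ tasks)).Nodup :=
    PySem.Set.nodup_ofList _
  have hndkeys : (pvBdep tasks reqs).keys.Nodup := by rw [hdk]; exact hndN
  -- every edge endpoint lies among the nodes
  have hEnode : ∀ e ∈ reqs.flatMap pvPairs,
      e.1 ∈ PySem.Set.ofList (reqs.flatten ++ tasks) ∧
      e.2 ∈ PySem.Set.ofList (reqs.flatten ++ tasks) := by
    intro e he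
    rw [List.mem_flatMap] at he
    obtain ⟨r, hr, her⟩ := he
    obtain ⟨h1, h2⟩ := pvPairs_mem her
    exact ⟨(PySem.Set.mem_ofList _ _).2 (List.mem_append_left _ (List.mem_flatten.2 ⟨r, hr, h1⟩)),
           (PySem.Set.mem_ofList _ _).2 (List.mem_append_left _ (List.mem_flatten.2 ⟨r, hr, h2⟩))⟩
  -- the zero-initialized counts dict
  have hz : ∀ k, ((pvBdep tasks reqs).keys.foldl
      (fun c node => c.insert node 0) (PySem.Dict.empty : PySem.Dict String Int)).getD k 0 = 0 :=
    pvZero_getD _ _ (fun k => by simp [PySem.Dict.getD_empty])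
  have hzkeys : ((pvBdep tasks reqs).keys.foldl
      (fun c node => c.insert node 0) (PySem.Dict.empty : PySem.Dict String Int)).keys
      = PySem.Set.ofList (reqs.flatten ++ tasks) := by
    rw [PySem.Dict.keys_foldl_insert, PySem.Dict.keys_empty, PySem.Set.update_nil_left, hdk,
        PySem.Set.ofList_ofList]
  have hvals := PySem.Dict.values_eq_map_keys (pvBdep tasks reqs) hndkeys PySem.Set.empty
  -- elements of the adjacency sets are edge targets, hence nodes
  have hmemval : ∀ l ∈ (pvBdep tasks reqs).values, ∀ x ∈ l,
      x ∈ PySem.Set.ofList (reqs.flatten ++ tasks) := by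
    intro l hl x hx
    rw [hvals] at hl
    obtain ⟨p, hp, rfl⟩ := List.mem_map.1 hl
    rw [hdv p] at hx
    have hpk : (p, x) ∈ reqs.flatMap pvPairs :=
      (pvVal_contains _ p x).1 ((PySem.Set.contains_iff _ _).2 hx)
    exact (hEnode _ hpk).2
  -- keys and values of the final counts dict
  have hckeys : (pvBdc tasks reqs).keys = PySem.Set.ofList (reqs.flatten ++ tasks) := by
    unfold pvBdc
    rw [pvIncr_keys _ _ (fun l hl x hx => by rw [hzkeys]; exact hmemval l hl x hx), hzkeys]
  have hcvals : ∀ k, (pvBdc tasks reqs).getD k 0 = pvCnt (reqs.flatMap pvPairs) k := by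
    intro k
    unfold pvBdc
    rw [pvIncr_getD, hz k, zero_add, hvals, List.map_map]
    have hcong : ((pvBdep tasks reqs).keys).map
        ((fun l => ((l.count k : Nat) : Int)) ∘
          (fun p => (pvBdep tasks reqs).getD p PySem.Set.empty))
        = ((pvBdep tasks reqs).keys).map
            (fun p => (((pvVal (reqs.flatMap pvPairs) p).count k : Nat) : Int)) :=
      List.map_congr_left (fun p _ => by
        exact congrArg (fun l => ((List.count k l : Nat) : Int)) (hdv p))
    rw [hcong, hdk]
    exact pvCount_from_graph _ _ k hndN (fun e he => (hEnode e he).1)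
  -- assemble both components
  refine Prod.ext ?_ ?_
  · rw [hAitems1, PySem.Dict.items_eq_map_keys (pvBdep tasks reqs) hndkeys PySem.Set.empty, hdk]
    exact (List.map_congr_left (fun k _ => by rw [hdv k])).symm
  · rw [hAitems2, PySem.Dict.items_eq_map_keys (pvBdc tasks reqs) (by rw [hckeys]; exact hndN) 0,
        hckeys]
    exact (List.map_congr_left (fun k _ => by rw [hcvals k])).symm
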